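-- pv_equiv track=rewrite | github.com/declined000/cardiomyocytes-regeneration | inspect_videos.py | classify_video
-- ===== SOURCE A (Python) =====
-- def classify_video(filename):
--     """Parse filename to extract condition, cell type, day, modality."""
--     fn = filename.lower()
--
--     # Day
--     day = "unknown"
--     for d in range(1, 10):
--         if f"day{d}" in fn:
--             day = f"day{d}"
--             break
--
--     # Modality
--     if "fl" in fn or "fluorescence" in fn:
--         modality = "FL"
--     elif "bf" in fn:
--         modality = "BF"
--     elif "dapi" in fn:
--         modality = "DAPI"
--     elif "phase" in fn:
--         modality = "Phase"
--     else:
--         modality = "BF"  # default for unlabeled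
--
--     # Cell type
--     if "jaz" in fn:
--         cell_type = "GCaMP6f"
--     elif "tammy" in fn:
--         cell_type = "XR1"
--     else:
--         cell_type = "Unknown"
--
--     # Condition
--     if "control" in fn or "comtrol" in fn:
--         location = "control"
--     elif "device" in fn:
--         location = "device"
--     else:
--         location = "unknown"
--
--     # Substrate
--     if "gold" in fn:
--         substrate = "gold"
--     elif "non" in fn:
--         substrate = "non"
--     else:
--         substrate = "unknown"
--
--     # Well
--     well = "unknown"
--     for w in ["A2", "A3", "B2", "B3", "C2", "C3"]:
--         if w.lower() in fn or w.upper() in fn: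
--             well = w.upper()
--             break
--     if well == "unknown" and "middlegold" in fn:
--         well = "mid"
--
--     # Duplicate marker
--     is_variant = "new" in fn or "fixed" in fn or "beating" in fn
--
--     return day, modality, cell_type, location, substrate, well, is_variant
-- ===== SOURCE B (Python) =====
-- # Different algorithm: ONE positional scan of the lowered filename computes the set of
-- # all matched keywords at once (a mini multi-pattern matcher); every field is then a
-- # pure lookup in that set instead of a separate substring search per needle.
--
-- KEYWORDS = ("day1", "day2", "day3", "day4", "day5", "day6", "day7", "day8", "day9",
--             "fl", "fluorescence", "bf", "dapi", "phase", "jaz", "tammy",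
--             "control", "comtrol", "device", "gold", "non",
--             "a2", "a3", "b2", "b3", "c2", "c3", "middlegold",
--             "new", "fixed", "beating")
--
--
-- def classify_video(filename):
--     """Parse filename to extract condition, cell type, day, modality."""
--     fn = filename.lower()
--     found = set()
--     for i in range(len(fn)):
--         for k in KEYWORDS:
--             if fn[i:i + len(k)] == k:
--                 found.add(k)
--
--     day = next((f"day{d}" for d in range(1, 10) if f"day{d}" in found), "unknown")
--     modality = next((v for k, v in (("fl", "FL"), ("fluorescence", "FL"), ("bf", "BF"),
--                                     ("dapi", "DAPI"), ("phase", "Phase"))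
--                      if k in found), "BF")
--     cell_type = next((v for k, v in (("jaz", "GCaMP6f"), ("tammy", "XR1"))
--                       if k in found), "Unknown")
--     location = next((v for k, v in (("control", "control"), ("comtrol", "control"),
--                                     ("device", "device"))
--                      if k in found), "unknown")
--     substrate = next((v for k, v in (("gold", "gold"), ("non", "non"))
--                       if k in found), "unknown")
--     well = next((v for k, v in (("a2", "A2"), ("a3", "A3"), ("b2", "B2"),
--                                 ("b3", "B3"), ("c2", "C2"), ("c3", "C3"),
--                                 ("middlegold", "mid"))
--                  if k in found), "unknown")
--     is_variant = any(k in found for k in ("new", "fixed", "beating"))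
--     return day, modality, cell_type, location, substrate, well, is_variant
-- ===== Notes on version B (the rewrite author's own statement) =====
-- stated objective: alternative
-- what changed: Replaces A's per-needle substring searches and if/elif cascades by a single positional scan of the lowered filename that builds the set of all matched keywords at once (a mini multi-pattern matcher); each field is then a pure first-match lookup in that set, the middlegold fallback becoming the last well entry and the dead uppercase well test disappearing.
import Mathlib
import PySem

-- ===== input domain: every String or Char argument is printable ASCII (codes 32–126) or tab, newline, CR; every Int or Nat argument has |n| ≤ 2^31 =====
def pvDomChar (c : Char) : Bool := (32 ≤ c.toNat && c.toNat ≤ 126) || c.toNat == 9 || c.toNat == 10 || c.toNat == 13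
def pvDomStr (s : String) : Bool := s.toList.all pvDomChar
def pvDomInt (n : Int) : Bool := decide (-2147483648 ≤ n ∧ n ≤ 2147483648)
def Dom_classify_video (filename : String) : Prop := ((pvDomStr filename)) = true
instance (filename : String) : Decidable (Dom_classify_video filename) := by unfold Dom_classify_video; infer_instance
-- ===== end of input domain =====

-- B replaces A's per-needle substring searches and if/elif cascades by ONE positional
-- scan building the set of all matched keywords, each field then a lookup in that set
-- (objective: alternative algorithm, same asymptotic cost).

-- ===== PORT A =====
-- the 'for d in range(1, 10): if f"day{d}" in fn: day = ...; break' loop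
def pvDayLoop (fn : String) : List Int → String
  | [] => "unknown"
  | d :: rest =>
    if PySem.Str.isIn ("day" ++ PySem.Int.toStr d) fn then "day" ++ PySem.Int.toStr d
    else pvDayLoop fn rest

-- the 'for w in ["A2", ...]: if w.lower() in fn or w.upper() in fn: well = w.upper(); break' loop
def pvWellLoop (fn : String) : List String → String
  | [] => "unknown"
  | w :: rest =>
    if PySem.Str.isIn (PySem.Str.lower w) fn || PySem.Str.isIn (PySem.Str.upper w) fn then
      PySem.Str.upper w
    else pvWellLoop fn rest

def classify_video (filename : String) : String × String × String × String × String × String × Bool :=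
  let fn := PySem.Str.lower filename
  let day := pvDayLoop fn (PySem.List.pyRange 1 10 1)
  let modality :=
    if PySem.Str.isIn "fl" fn || PySem.Str.isIn "fluorescence" fn then "FL"
    else if PySem.Str.isIn "bf" fn then "BF"
    else if PySem.Str.isIn "dapi" fn then "DAPI"
    else if PySem.Str.isIn "phase" fn then "Phase"
    else "BF"
  let cell_type :=
    if PySem.Str.isIn "jaz" fn then "GCaMP6f"
    else if PySem.Str.isIn "tammy" fn then "XR1"
    else "Unknown"
  let location :=
    if PySem.Str.isIn "control" fn || PySem.Str.isIn "comtrol" fn then "control"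
    else if PySem.Str.isIn "device" fn then "device"
    else "unknown"
  let substrate :=
    if PySem.Str.isIn "gold" fn then "gold"
    else if PySem.Str.isIn "non" fn then "non"
    else "unknown"
  let well0 := pvWellLoop fn ["A2", "A3", "B2", "B3", "C2", "C3"]
  let well := if well0 = "unknown" ∧ PySem.Str.isIn "middlegold" fn = true then "mid" else well0
  let is_variant := PySem.Str.isIn "new" fn || PySem.Str.isIn "fixed" fn || PySem.Str.isIn "beating" fn
  (day, modality, cell_type, location, substrate, well, is_variant)

-- ===== PORT B =====
def pvKeywords : List String :=
  ["day1", "day2", "day3", "day4", "day5", "day6", "day7", "day8", "day9",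
   "fl", "fluorescence", "bf", "dapi", "phase", "jaz", "tammy",
   "control", "comtrol", "device", "gold", "non",
   "a2", "a3", "b2", "b3", "c2", "c3", "middlegold",
   "new", "fixed", "beating"]

-- 'for i in range(len(fn)): for k in KEYWORDS: if fn[i:i+len(k)] == k: found.add(k)'
def pvFound (fnl : List Char) : PySem.Set String :=
  (List.range fnl.length).foldl
    (fun (s : PySem.Set String) (i : Nat) => pvKeywords.foldl
      (fun s k =>
        if PySem.List.slice fnl (some (i : Int)) (some ((i : Int) + (k.toList.length : Int))) = k.toList
        then PySem.Set.add s k else s) s)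
    PySem.Set.empty

-- 'next((v for k, v in table if k in found), dflt)'
def pvFirst (found : PySem.Set String) : List (String × String) → String → String
  | [], dflt => dflt
  | (k, v) :: rest, dflt => if PySem.Set.contains found k then v else pvFirst found rest dflt

def classify_video_alt (filename : String) : String × String × String × String × String × String × Bool :=
  let fn := PySem.Str.lower filename
  let found := pvFound fn.toList
  (pvFirst found ((PySem.List.pyRange 1 10 1).map
      (fun d => ("day" ++ PySem.Int.toStr d, "day" ++ PySem.Int.toStr d))) "unknown",
   pvFirst found [("fl", "FL"), ("fluorescence", "FL"), ("bf", "BF"), ("dapi", "DAPI"), ("phase", "Phase")] "BF",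
   pvFirst found [("jaz", "GCaMP6f"), ("tammy", "XR1")] "Unknown",
   pvFirst found [("control", "control"), ("comtrol", "control"), ("device", "device")] "unknown",
   pvFirst found [("gold", "gold"), ("non", "non")] "unknown",
   pvFirst found [("a2", "A2"), ("a3", "A3"), ("b2", "B2"), ("b3", "B3"), ("c2", "C2"), ("c3", "C3"),
                  ("middlegold", "mid")] "unknown",
   ["new", "fixed", "beating"].any (fun k => PySem.Set.contains found k))

-- ===== PRECONDITION & SPEC =====
def Spec_classify_video (filename : String) (out : String × String × String × String × String × String × Bool) : Prop := out = classify_video_alt filename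
instance (filename : String) (out : String × String × String × String × String × String × Bool) : Decidable (Spec_classify_video filename out) := by unfold Spec_classify_video; infer_instance

-- ===== CLAIM (what is proved, stated in full; the proofs are below) =====
def Claim_equal_classify_video : Prop := ∀ (filename : String), Dom_classify_video filename → Spec_classify_video filename (classify_video filename)

-- ===== LEMMAS AND PROOFS =====

-- membership after the inner keyword loop
lemma pv_mem_inner (q : String → Prop) [DecidablePred q] (ks : List String)
    (s : PySem.Set String) (x : String) :
    x ∈ ks.foldl (fun s k => if q k then PySem.Set.add s k else s) s ↔
      x ∈ s ∨ (x ∈ ks ∧ q x) := by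
  induction ks generalizing s with
  | nil => simp
  | cons k rest ih =>
    simp only [List.foldl_cons, List.mem_cons]
    by_cases hq : q k
    · simp only [if_pos hq, ih, PySem.Set.mem_add]
      constructor
      · rintro (((h | rfl) | h)) <;> tauto
      · rintro (h | ⟨(rfl | h), hx⟩) <;> tauto
    · simp only [if_neg hq, ih]
      constructor
      · rintro (h | h) <;> tauto
      · rintro (h | ⟨(rfl | h), hx⟩) <;> tauto

-- membership after the full positional scan
lemma pv_mem_outer (fnl : List Char) (l : List Nat) (s0 : PySem.Set String) (x : String) :
    x ∈ l.foldl
      (fun (s : PySem.Set String) (i : Nat) => pvKeywords.foldl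
        (fun s k =>
          if PySem.List.slice fnl (some (i : Int)) (some ((i : Int) + (k.toList.length : Int))) = k.toList
          then PySem.Set.add s k else s) s) s0 ↔
      x ∈ s0 ∨ (x ∈ pvKeywords ∧ ∃ i ∈ l,
        PySem.List.slice fnl (some (i : Int)) (some ((i : Int) + (x.toList.length : Int))) = x.toList) := by
  induction l generalizing s0 with
  | nil => simp
  | cons i rest ih =>
    simp only [List.foldl_cons, ih, pv_mem_inner, List.mem_cons]
    constructor
    · rintro ((h | ⟨hk, hq⟩) | ⟨hk, j, hj, hq⟩)
      · exact Or.inl h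
      · exact Or.inr ⟨hk, i, Or.inl rfl, hq⟩
      · exact Or.inr ⟨hk, j, Or.inr hj, hq⟩
    · rintro (h | ⟨hk, j, (rfl | hj), hq⟩)
      · exact Or.inl (Or.inl h)
      · exact Or.inl (Or.inr ⟨hk, hq⟩)
      · exact Or.inr ⟨hk, j, hj, hq⟩

lemma pv_exists_iff_infix (fnl kl : List Char) (hne : kl ≠ []) :
    (∃ i ∈ List.range fnl.length, (fnl.drop i).take kl.length = kl) ↔ kl <:+: fnl := by
  constructor
  · rintro ⟨i, -, h⟩
    exact (h ▸ List.take_prefix kl.length (fnl.drop i)).isInfix.trans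
      (List.drop_suffix i fnl).isInfix
  · rintro ⟨s, t, h⟩
    refine ⟨s.length, List.mem_range.mpr ?_, ?_⟩
    · have hlen := congrArg List.length h
      have h1 : 1 ≤ kl.length := by
        cases kl with
        | nil => exact absurd rfl hne
        | cons a as => simp
      simp only [List.length_append] at hlen
      omega
    · rw [← h, show s ++ kl ++ t = s ++ (kl ++ t) from by simp, List.drop_left, List.take_left]

-- what the scanned set contains: exactly the keywords occurring as substrings
lemma pv_contains_found (s k : String) (hk : k ∈ pvKeywords) (hne : k.toList ≠ []) :
    PySem.Set.contains (pvFound s.toList) k = PySem.Str.isIn k s := by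
  rw [Bool.eq_iff_iff]
  rw [show (PySem.Set.contains (pvFound s.toList) k = true) ↔ k ∈ pvFound s.toList from by
    simp [PySem.Set.contains]]
  unfold pvFound
  rw [pv_mem_outer]
  simp only [PySem.Set.empty, List.not_mem_nil, false_or]
  rw [PySem.Str.isIn_iff_infix, ← pv_exists_iff_infix s.toList k.toList hne]
  constructor
  · rintro ⟨-, i, hi, hq⟩
    refine ⟨i, hi, ?_⟩
    rwa [PySem.List.slice_natCast_add] at hq
  · rintro ⟨i, hi, hq⟩
    exact ⟨hk, i, hi, by rwa [PySem.List.slice_natCast_add]⟩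

lemma pv_pyRange_eval : PySem.List.pyRange 1 10 1 = [1, 2, 3, 4, 5, 6, 7, 8, 9] := by decide

lemma pv_char_le_iff (a c : Char) : (a ≤ c) ↔ a.toNat ≤ c.toNat := by
  rw [Char.le_def, UInt32.le_iff_toNat_le]; exact Iff.rfl

lemma pv_lowerChar_bound (c : Char) :
    (PySem.Chars.lowerChar c).toNat < 65 ∨ 90 < (PySem.Chars.lowerChar c).toNat := by
  unfold PySem.Chars.lowerChar PySem.Chars.isupper
  have hA : 'A'.toNat = 65 := rfl
  have hZ : 'Z'.toNat = 90 := rfl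
  split
  · next h =>
    simp only [Bool.and_eq_true, decide_eq_true_eq, pv_char_le_iff, hA, hZ] at h
    rw [Char.toNat_ofNat]
    have hv : (c.toNat + 32).isValidChar := by unfold Nat.isValidChar; omega
    simp [hv]; omega
  · next h =>
    simp only [Bool.and_eq_true, decide_eq_true_eq, pv_char_le_iff, hA, hZ, not_and, not_le] at h
    omega

-- an uppercase-letter-containing needle is never a substring of a lowercased string
lemma pv_isIn_AZ_lower (w s : String) (c : Char) (hmem : c ∈ w.toList)
    (hA : 65 ≤ c.toNat) (hZ : c.toNat ≤ 90) :
    PySem.Str.isIn w (PySem.Str.lower s) = false := by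
  rw [PySem.Str.isIn_eq, PySem.Str.toList_lower]
  refine (PySem.Chars.isIn_eq_false_iff _ _).mpr (fun hinf => ?_)
  have hm := hinf.subset hmem
  unfold PySem.Chars.lower at hm
  obtain ⟨c0, -, hc0⟩ := List.mem_map.mp hm
  rcases pv_lowerChar_bound c0 with h | h <;> rw [hc0] at h <;> omega

-- ===== VERDICT (by name: the statement is the Claim_ definition above) =====
theorem classify_video_spec : Claim_equal_classify_video := by
  intro filename _
  unfold Spec_classify_video classify_video classify_video_alt
  simp only []
  set fn := PySem.Str.lower filename with hfn
  have hC : ∀ k, k ∈ pvKeywords → k.toList ≠ [] →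
      PySem.Set.contains (pvFound fn.toList) k = PySem.Str.isIn k fn := by
    intro k hk hne; exact pv_contains_found fn k hk hne
  have d1 : ("day" ++ PySem.Int.toStr 1 : String) = "day1" := by decide
  have d2 : ("day" ++ PySem.Int.toStr 2 : String) = "day2" := by decide
  have d3 : ("day" ++ PySem.Int.toStr 3 : String) = "day3" := by decide
  have d4 : ("day" ++ PySem.Int.toStr 4 : String) = "day4" := by decide
  have d5 : ("day" ++ PySem.Int.toStr 5 : String) = "day5" := by decide
  have d6 : ("day" ++ PySem.Int.toStr 6 : String) = "day6" := by decide
  have d7 : ("day" ++ PySem.Int.toStr 7 : String) = "day7" := by decide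
  have d8 : ("day" ++ PySem.Int.toStr 8 : String) = "day8" := by decide
  have d9 : ("day" ++ PySem.Int.toStr 9 : String) = "day9" := by decide
  simp only [pv_pyRange_eval, List.map, pvDayLoop, pvFirst, pvWellLoop, List.any_cons, List.any_nil,
    d1, d2, d3, d4, d5, d6, d7, d8, d9,
    hC "day1" (by decide) (by decide), hC "day2" (by decide) (by decide),
    hC "day3" (by decide) (by decide), hC "day4" (by decide) (by decide),
    hC "day5" (by decide) (by decide), hC "day6" (by decide) (by decide),
    hC "day7" (by decide) (by decide), hC "day8" (by decide) (by decide),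
    hC "day9" (by decide) (by decide),
    hC "fl" (by decide) (by decide), hC "fluorescence" (by decide) (by decide),
    hC "bf" (by decide) (by decide), hC "dapi" (by decide) (by decide),
    hC "phase" (by decide) (by decide), hC "jaz" (by decide) (by decide),
    hC "tammy" (by decide) (by decide), hC "control" (by decide) (by decide),
    hC "comtrol" (by decide) (by decide), hC "device" (by decide) (by decide),
    hC "gold" (by decide) (by decide), hC "non" (by decide) (by decide),
    hC "a2" (by decide) (by decide), hC "a3" (by decide) (by decide),
    hC "b2" (by decide) (by decide), hC "b3" (by decide) (by decide),
    hC "c2" (by decide) (by decide), hC "c3" (by decide) (by decide),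
    hC "middlegold" (by decide) (by decide), hC "new" (by decide) (by decide),
    hC "fixed" (by decide) (by decide), hC "beating" (by decide) (by decide)]
  have hU2 : ∀ w : String, (∃ c ∈ w.toList, 65 ≤ c.toNat ∧ c.toNat ≤ 90) →
      PySem.Str.isIn w fn = false := by
    rintro w ⟨c, hc, h1, h2⟩; rw [hfn]; exact pv_isIn_AZ_lower w filename c hc h1 h2
  have e1 : PySem.Str.lower "A2" = "a2" := by decide
  have e2 : PySem.Str.lower "A3" = "a3" := by decide
  have e3 : PySem.Str.lower "B2" = "b2" := by decide
  have e4 : PySem.Str.lower "B3" = "b3" := by decide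
  have e5 : PySem.Str.lower "C2" = "c2" := by decide
  have e6 : PySem.Str.lower "C3" = "c3" := by decide
  have u1 : PySem.Str.upper "A2" = "A2" := by decide
  have u2 : PySem.Str.upper "A3" = "A3" := by decide
  have u3 : PySem.Str.upper "B2" = "B2" := by decide
  have u4 : PySem.Str.upper "B3" = "B3" := by decide
  have u5 : PySem.Str.upper "C2" = "C2" := by decide
  have u6 : PySem.Str.upper "C3" = "C3" := by decide
  simp only [e1, e2, e3, e4, e5, e6, u1, u2, u3, u4, u5, u6,
    hU2 "A2" ⟨'A', by decide, by decide, by decide⟩,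
    hU2 "A3" ⟨'A', by decide, by decide, by decide⟩,
    hU2 "B2" ⟨'B', by decide, by decide, by decide⟩,
    hU2 "B3" ⟨'B', by decide, by decide, by decide⟩,
    hU2 "C2" ⟨'C', by decide, by decide, by decide⟩,
    hU2 "C3" ⟨'C', by decide, by decide, by decide⟩,
    Bool.or_false, Prod.mk.injEq]
  refine ⟨trivial, ?_, trivial, ?_, trivial, ?_, ?_⟩
  · cases PySem.Str.isIn "fl" fn <;> cases PySem.Str.isIn "fluorescence" fn <;> simp
  · cases PySem.Str.isIn "control" fn <;> cases PySem.Str.isIn "comtrol" fn <;> simp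
  · cases PySem.Str.isIn "a2" fn <;> cases PySem.Str.isIn "a3" fn <;>
      cases PySem.Str.isIn "b2" fn <;> cases PySem.Str.isIn "b3" fn <;>
      cases PySem.Str.isIn "c2" fn <;> cases PySem.Str.isIn "c3" fn <;>
      cases PySem.Str.isIn "middlegold" fn <;> simp
  · cases PySem.Str.isIn "new" fn <;> cases PySem.Str.isIn "fixed" fn <;>
      cases PySem.Str.isIn "beating" fn <;> simp
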